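-- pv_equiv track=rewrite | github.com/GalaxyXieyu/Multi-Lightrag | docs/lightrag_mini/core/operate.py | merge_duplicate_relationships
-- ===== SOURCE A (Python) =====
-- from typing import Any, Dict, List, Optional, Tuple
--
-- def merge_duplicate_relationships(relationships: List[Dict[str, Any]]) -> List[Dict[str, Any]]:
--     """
--     Merge duplicate relationships
--
--     Args:
--         relationships: List of relationship dictionaries
--
--     Returns:
--         List of merged relationships
--     """
--     if not relationships:
--         return []
--
--     # Group by source-target pairs
--     rel_groups = {}
--
--     for rel in relationships:
--         source = rel.get("source", "").lower()
--         target = rel.get("target", "").lower()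
--         key = f"{source}->{target}"
--
--         if key not in rel_groups:
--             rel_groups[key] = []
--         rel_groups[key].append(rel)
--
--     # Merge relationships in each group
--     merged = []
--     for group in rel_groups.values():
--         if len(group) == 1:
--             merged.append(group[0])
--         else:
--             # Merge descriptions
--             merged_rel = {
--                 "source": group[0].get("source", ""),
--                 "target": group[0].get("target", ""),
--                 "relation": group[0].get("relation", ""),
--                 "description": "; ".join([r.get("description", "") for r in group if r.get("description")])
--             }
--             merged.append(merged_rel)
--
--     return merged
-- ===== SOURCE B (Python) =====
-- def merge_duplicate_relationships(relationships):
--     """Single pass: an insertion-ordered dict keyed by source->target holds the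
--     already-merged value for each key, so no per-key lists and no reshape pass."""
--     groups = {}
--     for rel in relationships:
--         key = f'{rel.get("source", "").lower()}->{rel.get("target", "").lower()}'
--         entry = groups.get(key)
--         if entry is None:
--             groups[key] = (1, rel)
--         else:
--             n, cur = entry
--             if n == 1:
--                 descs = [d for d in (cur.get("description", ""), rel.get("description", "")) if d]
--                 merged = {
--                     "source": cur.get("source", ""),
--                     "target": cur.get("target", ""),
--                     "relation": cur.get("relation", ""),
--                     "description": "; ".join(descs),
--                 }
--             else:
--                 d = rel.get("description", "")
--                 merged = cur
--                 if d:
--                     merged = dict(cur)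
--                     merged["description"] = (cur["description"] + "; " + d) if cur["description"] else d
--             groups[key] = (n + 1, merged)
--     return [v for _, v in groups.values()]
-- ===== Notes on version B (the rewrite author's own statement) =====
-- stated objective: alternative
-- what changed: Replaces A's two-pass grouping (build per-key lists in a dict, then a second pass reshaping each group) with a single fold that keeps, per source->target key, the already-merged value (the original rel on first sight, a 4-key merged dict with an incrementally extended '; '-joined description afterwards), so the per-key lists and the reshape pass disappear.
import Mathlib
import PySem

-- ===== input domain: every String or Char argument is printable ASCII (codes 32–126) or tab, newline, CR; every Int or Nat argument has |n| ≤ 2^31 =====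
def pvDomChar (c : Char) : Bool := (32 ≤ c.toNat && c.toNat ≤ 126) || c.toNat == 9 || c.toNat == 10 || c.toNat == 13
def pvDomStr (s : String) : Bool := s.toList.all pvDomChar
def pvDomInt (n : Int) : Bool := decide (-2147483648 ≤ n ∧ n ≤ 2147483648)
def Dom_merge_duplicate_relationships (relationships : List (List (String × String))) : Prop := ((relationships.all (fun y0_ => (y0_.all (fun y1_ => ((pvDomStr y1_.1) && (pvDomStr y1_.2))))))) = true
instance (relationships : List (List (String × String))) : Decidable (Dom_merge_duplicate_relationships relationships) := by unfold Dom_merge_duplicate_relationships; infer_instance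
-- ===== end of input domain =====

-- B merges each source->target group in a single fold over the relationships (no per-key
-- grouping lists, no second reshape pass); objective: alternative decomposition, same cost.


-- ===== PORT A =====
-- rel.get(k, "")  (first-match lookup on the association list, per the type convention)
def pvGet (rel : List (String × String)) (k : String) : String :=
  (PySem.Dict.mk rel).getD k ""

-- f"{rel.get('source','').lower()}->{rel.get('target','').lower()}"
def pvKey (rel : List (String × String)) : String :=
  PySem.Str.lower (pvGet rel "source") ++ "->" ++ PySem.Str.lower (pvGet rel "target")

-- body of A's first loop: "if key not in rel_groups: rel_groups[key] = []; rel_groups[key].append(rel)"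
def pvGroupStep (d : PySem.Dict String (List (List (String × String))))
    (rel : List (String × String)) : PySem.Dict String (List (List (String × String))) :=
  let key := pvKey rel
  let d := if d.contains key = false then d.insert key [] else d
  d.insert key (d.getD key [] ++ [rel])

-- body of A's second loop (group[0] is total here; .getD [] is unreachable for nonempty groups)
def pvMergeGroup (group : List (List (String × String))) : List (String × String) :=
  if group.length = 1 then (PySem.List.pyGet? group 0).getD []
  else
    let g0 := (PySem.List.pyGet? group 0).getD []
    [("source", pvGet g0 "source"), ("target", pvGet g0 "target"),
     ("relation", pvGet g0 "relation"),
     ("description", PySem.Str.join "; "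
        ((group.filter (fun r => pvGet r "description" ≠ "")).map (fun r => pvGet r "description")))]

def merge_duplicate_relationships (relationships : List (List (String × String))) :
    List (List (String × String)) :=
  if relationships = [] then []
  else
    let rel_groups := relationships.foldl pvGroupStep PySem.Dict.empty
    rel_groups.values.foldl (fun merged group => merged ++ [pvMergeGroup group]) []

-- ===== PORT B =====
-- the merged value B computes when key was already seen with entry (n, cur)
def pvBMerge (n : Int) (cur rel : List (String × String)) : List (String × String) :=
  if n = 1 then
    [("source", pvGet cur "source"), ("target", pvGet cur "target"),
     ("relation", pvGet cur "relation"),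
     ("description", PySem.Str.join "; "
        (([pvGet cur "description", pvGet rel "description"]).filter (fun s => s ≠ "")))]
  else
    let dsc := pvGet rel "description"
    if dsc = "" then cur
    else
      -- merged = dict(cur); merged["description"] = … ; cur["description"] cannot miss here
      ((PySem.Dict.mk cur).insert "description"
         (if pvGet cur "description" = "" then dsc
          else pvGet cur "description" ++ "; " ++ dsc)).items

-- body of B's single loop: groups[key] is (count, merged-so-far)
def pvBStep (d : PySem.Dict String (Int × List (String × String)))
    (rel : List (String × String)) : PySem.Dict String (Int × List (String × String)) :=
  let key := pvKey rel
  match d.get? key with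
  | none => d.insert key (1, rel)
  | some (n, cur) => d.insert key (n + 1, pvBMerge n cur rel)

def merge_duplicate_relationships_alt (relationships : List (List (String × String))) :
    List (List (String × String)) :=
  ((relationships.foldl pvBStep PySem.Dict.empty).values).map Prod.snd

-- ===== PRECONDITION & SPEC =====
def Spec_merge_duplicate_relationships (relationships : List (List (String × String))) (out : List (List (String × String))) : Prop := out = merge_duplicate_relationships_alt relationships
instance (relationships : List (List (String × String))) (out : List (List (String × String))) : Decidable (Spec_merge_duplicate_relationships relationships out) := by unfold Spec_merge_duplicate_relationships; infer_instance

-- ===== CLAIM (what is proved, stated in full; the proofs are below) =====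
def Claim_equal_merge_duplicate_relationships : Prop := ∀ (relationships : List (List (String × String))), Dom_merge_duplicate_relationships relationships → Spec_merge_duplicate_relationships relationships (merge_duplicate_relationships relationships)

-- ===== LEMMAS AND PROOFS =====
lemma pv_mergeGroup_singleton (x : List (String × String)) : pvMergeGroup [x] = x := by
  simp [pvMergeGroup]

-- description components are truthy
lemma pv_descs_ne (g : List (List (String × String))) :
    ∀ s ∈ (g.filter (fun r => pvGet r "description" ≠ "")).map (fun r => pvGet r "description"), s ≠ "" := by
  intro s hs
  simp only [List.mem_map, List.mem_filter] at hs
  obtain ⟨r, ⟨-, hr⟩, rfl⟩ := hs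
  simpa using hr

lemma pv_mergeGroup_cons_cons (x y : List (String × String)) (t : List (List (String × String))) :
    pvMergeGroup (x :: y :: t) =
    [("source", pvGet x "source"), ("target", pvGet x "target"),
     ("relation", pvGet x "relation"),
     ("description", PySem.Str.join "; "
        (((x :: y :: t).filter (fun r => pvGet r "description" ≠ "")).map (fun r => pvGet r "description")))] := by
  have h0 : (0:Int) ≤ (t.length : Int) + 1 := by positivity
  simp [pvMergeGroup, PySem.List.pyGet?, PySem.List.pyIdx?, h0]
lemma pvGet_lit (s t r D k : String) :
    pvGet [("source", s), ("target", t), ("relation", r), ("description", D)] k =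
    if k = "source" then s else if k = "target" then t else if k = "relation" then r
    else if k = "description" then D else "" := by
  simp only [pvGet, PySem.Dict.getD_eq_get?_getD, PySem.Dict.get?_mk_cons]
  split_ifs <;> simp_all [PySem.Dict.get?]
lemma chars_join_append (sep : List Char) (xs : List (List Char)) (d : List Char) (h : xs ≠ []) :
    PySem.Chars.join sep (xs ++ [d]) = PySem.Chars.join sep xs ++ sep ++ d := by
  induction xs with
  | nil => simp at h
  | cons x rest ih =>
    cases rest with
    | nil => simp [PySem.Chars.join_cons_cons, PySem.Chars.join_singleton]
    | cons y t =>
      rw [List.cons_append, show (y :: t) ++ [d] = y :: (t ++ [d]) from rfl,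
        PySem.Chars.join_cons_cons, PySem.Chars.join_cons_cons,
        show y :: (t ++ [d]) = (y :: t) ++ [d] from rfl, ih (by simp)]
      simp [List.append_assoc]

lemma pv_join_append (xs : List String) (d : String) (h : xs ≠ []) :
    PySem.Str.join "; " (xs ++ [d]) = PySem.Str.join "; " xs ++ "; " ++ d := by
  apply String.toList_injective
  simp only [PySem.Str.toList_join, String.toList_append, List.map_append, List.map_cons,
    List.map_nil]
  exact chars_join_append _ _ _ (by simpa using h)

lemma pv_join_ne_nil {xs : List String} (hne : ∀ s ∈ xs, s ≠ "") (h : xs ≠ []) :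
    PySem.Str.join "; " xs ≠ "" := by
  intro hj
  have := congrArg String.toList hj
  rw [PySem.Str.toList_join] at this
  match xs, h with
  | [x], _ =>
    rw [List.map_cons, List.map_nil, PySem.Chars.join_singleton] at this
    exact hne x (by simp) (String.toList_injective (by simpa using this))
  | x :: y :: t, _ =>
    rw [List.map_cons, List.map_cons, PySem.Chars.join_cons_cons] at this
    simp at this

lemma pv_join_singleton (d : String) : PySem.Str.join "; " [d] = d := by
  apply String.toList_injective
  simp [PySem.Str.toList_join, PySem.Chars.join_singleton]

lemma pv_step_value (g : List (List (String × String))) (rel : List (String × String))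
    (hg : g ≠ []) :
    pvBMerge (g.length : Int) (pvMergeGroup g) rel = pvMergeGroup (g ++ [rel]) := by
  match g, hg with
  | [x], _ =>
    rw [pv_mergeGroup_singleton, show [x] ++ [rel] = [x, rel] from rfl,
      pv_mergeGroup_cons_cons x rel []]
    simp only [pvBMerge, List.length_cons, List.length_nil]
    by_cases hx : pvGet x "description" = "" <;> by_cases hr : pvGet rel "description" = "" <;>
      simp [List.filter, hx, hr, pv_join_singleton]
  | x :: y :: t, _ =>
    have hn : ((x :: y :: t).length : Int) ≠ 1 := by simp; omega
    rw [pv_mergeGroup_cons_cons x y t,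
      show (x :: y :: t) ++ [rel] = x :: y :: (t ++ [rel]) from rfl,
      pv_mergeGroup_cons_cons x y (t ++ [rel])]
    set descs := ((x :: y :: t).filter (fun r => pvGet r "description" ≠ "")).map
      (fun r => pvGet r "description") with hdescs
    have hfilterapp : ((x :: y :: (t ++ [rel])).filter (fun r => pvGet r "description" ≠ "")).map
        (fun r => pvGet r "description") =
        descs ++ (([rel].filter (fun r => pvGet r "description" ≠ "")).map
          (fun r => pvGet r "description")) := by
      rw [hdescs, ← List.map_append, ← List.filter_append]
      rfl
    simp only [pvBMerge, if_neg hn]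
    by_cases hd : pvGet rel "description" = ""
    · rw [hfilterapp]
      simp only [List.filter, hd]
      simp
    · rw [hfilterapp]
      have hrelf : (([rel].filter (fun r => pvGet r "description" ≠ "")).map
          (fun r => pvGet r "description")) = [pvGet rel "description"] := by
        simp [List.filter, hd]
      rw [hrelf]
      have hcur : pvGet [("source", pvGet x "source"), ("target", pvGet x "target"),
          ("relation", pvGet x "relation"), ("description", PySem.Str.join "; " descs)]
          "description" = PySem.Str.join "; " descs := by simp [pvGet_lit]
      by_cases hdn : descs = []
      · rw [if_neg hd]
        have hD : PySem.Str.join "; " descs = "" := by rw [hdn]; rfl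
        simp [PySem.Dict.items_insert, pvGet_lit, hdn, pv_join_singleton,
          show PySem.Str.join "; " ([] : List String) = "" from rfl]
      · rw [if_neg hd]
        have hD : PySem.Str.join "; " descs ≠ "" :=
          pv_join_ne_nil (by rw [hdescs]; exact pv_descs_ne _) hdn
        rw [pv_join_append _ _ hdn]
        simp [PySem.Dict.items_insert, hcur, hD]
def pvF (g : List (List (String × String))) : Int × List (String × String) :=
  ((g.length : Int), pvMergeGroup g)

def pvInv (a : PySem.Dict String (List (List (String × String))))
    (b : PySem.Dict String (Int × List (String × String))) : Prop :=
  a.keys.Nodup ∧ b.keys = a.keys ∧ (∀ k, b.get? k = (a.get? k).map pvF) ∧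
  (∀ k g, a.get? k = some g → g ≠ [])

lemma pv_inv_step (a : PySem.Dict String (List (List (String × String))))
    (b : PySem.Dict String (Int × List (String × String))) (rel : List (String × String))
    (h : pvInv a b) : pvInv (pvGroupStep a rel) (pvBStep b rel) := by
  obtain ⟨hnd, hkeys, hget, hne⟩ := h
  set key := pvKey rel with hkey
  by_cases hc : a.contains key = true
  · -- key already grouped
    obtain ⟨g, hg⟩ : ∃ g, a.get? key = some g := by
      rcases ho : a.get? key with _ | g
      · rw [PySem.Dict.contains_eq_isSome_get?, ho] at hc; simp at hc
      · exact ⟨g, rfl⟩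
    have hbg : b.get? key = some (pvF g) := by rw [hget, hg]; rfl
    have hA : pvGroupStep a rel = a.insert key (g ++ [rel]) := by
      simp only [pvGroupStep, ← hkey, hc]
      simp [PySem.Dict.getD_of_get?_eq_some _ _ hg]
    have hB : pvBStep b rel = b.insert key ((g.length : Int) + 1, pvBMerge (g.length : Int) (pvMergeGroup g) rel) := by
      simp only [pvBStep, ← hkey, hbg]; rfl
    rw [hA, hB, pv_step_value g rel (hne key g hg)]
    refine ⟨by rwa [PySem.Dict.keys_insert_of_contains _ _ hc], ?_, ?_, ?_⟩
    · rw [PySem.Dict.keys_insert_of_contains _ _ hc,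
        PySem.Dict.keys_insert_of_contains _ _ (by
          rw [PySem.Dict.contains_eq_isSome_get?, hbg]; rfl), hkeys]
    · intro k
      rw [PySem.Dict.get?_insert, PySem.Dict.get?_insert]
      split_ifs with hk
      · simp [pvF]
      · exact hget k
    · intro k g' hg'
      rw [PySem.Dict.get?_insert] at hg'
      split_ifs at hg' with hk
      · simp at hg'; subst hg'; simp
      · exact hne k g' hg'
  · -- fresh key
    have hc' : a.contains key = false := by simpa using hc
    have hga : a.get? key = none := by
      rw [PySem.Dict.contains_eq_isSome_get?] at hc'
      rcases ho : a.get? key with _ | g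
      · rfl
      · rw [ho] at hc'; simp at hc'
    have hgb : b.get? key = none := by rw [hget, hga]; rfl
    have hA : pvGroupStep a rel = a.insert key [rel] := by
      simp only [pvGroupStep, ← hkey, hc', if_true]
      rw [PySem.Dict.getD_insert_self, PySem.Dict.insert_insert_self]
      rfl
    have hB : pvBStep b rel = b.insert key (1, rel) := by
      simp only [pvBStep, ← hkey, hgb]
    have hkmem : key ∉ a.keys := (PySem.Dict.get?_eq_none_iff_not_mem_keys _ _).mp hga
    rw [hA, hB]
    refine ⟨?_, ?_, ?_, ?_⟩
    · rw [PySem.Dict.keys_insert_of_not_contains _ _ hc']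
      simp [List.nodup_append, hnd]
      exact fun x hx he => hkmem (he ▸ hx)
    · rw [PySem.Dict.keys_insert_of_not_contains _ _ hc',
        PySem.Dict.keys_insert_of_not_contains _ _ (by
          rw [PySem.Dict.contains_eq_isSome_get?, hgb]; rfl), hkeys]
    · intro k
      rw [PySem.Dict.get?_insert, PySem.Dict.get?_insert]
      split_ifs with hk
      · simp [pvF, pv_mergeGroup_singleton]
      · exact hget k
    · intro k g' hg'
      rw [PySem.Dict.get?_insert] at hg'
      split_ifs at hg' with hk
      · simp at hg'; subst hg'; simp
      · exact hne k g' hg'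
lemma pv_inv_fold (rels : List (List (String × String)))
    (a : PySem.Dict String (List (List (String × String))))
    (b : PySem.Dict String (Int × List (String × String))) (h : pvInv a b) :
    pvInv (rels.foldl pvGroupStep a) (rels.foldl pvBStep b) := by
  induction rels generalizing a b with
  | nil => exact h
  | cons r t ih => exact ih _ _ (pv_inv_step a b r h)

theorem pv_main (rels : List (List (String × String))) :
    merge_duplicate_relationships rels = merge_duplicate_relationships_alt rels := by
  by_cases h : rels = []
  · subst h; rfl
  · unfold merge_duplicate_relationships merge_duplicate_relationships_alt
    rw [if_neg h]
    obtain ⟨hnd, hkeys, hget, hne⟩ := pv_inv_fold rels PySem.Dict.empty PySem.Dict.empty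
      ⟨by simp [PySem.Dict.keys_empty], by simp [PySem.Dict.keys_empty],
       fun k => by simp [PySem.Dict.get?_empty], fun k g hg => by simp [PySem.Dict.get?_empty] at hg⟩
    set a := rels.foldl pvGroupStep PySem.Dict.empty
    set b := rels.foldl pvBStep PySem.Dict.empty
    rw [PySem.List.foldl_append_singleton_eq_map, List.nil_append,
      PySem.Dict.values_eq_map_keys a hnd [],
      PySem.Dict.values_eq_map_keys b (by rwa [hkeys]) ((0 : Int), ([] : List (String × String))),
      hkeys, List.map_map, List.map_map]
    apply List.map_congr_left
    intro k hk
    obtain ⟨g, hg⟩ : ∃ g, a.get? k = some g := by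
      rcases ho : a.get? k with _ | g
      · exact absurd ((PySem.Dict.get?_eq_none_iff_not_mem_keys _ _).mp ho) (by simpa using hk)
      · exact ⟨g, rfl⟩
    simp [Function.comp, PySem.Dict.getD_eq_get?_getD, hg, hget k, pvF]

-- ===== VERDICT (by name: the statement is the Claim_ definition above) =====
theorem merge_duplicate_relationships_spec : Claim_equal_merge_duplicate_relationships := by
  intro rels _
  unfold Spec_merge_duplicate_relationships
  exact pv_main rels
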